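-- pv_equiv track=rewrite | github.com/howard36/Competitive-Programming | CCC/CCC '11 S3 - Alice Through the Looking Glass.py | crystal
-- ===== SOURCE A (Python) =====
-- def crystal(m, x, y):
--     if m == 1:
--         if (x,y) in {(1,0), (2,0), (3,0), (2,1)}:
--             return True
--         else:
--             return False
--     big_x = x // (5**(m-1))
--     big_y = y // (5**(m-1))
--     if (big_x, big_y) in {(1,0), (2,0), (3,0), (2,1)}:
--         return True
--     elif (big_x, big_y) in {(1,1), (2,2), (3,1)}:
--         new_x = x % (5**(m-1))
--         new_y = y % (5**(m-1))
--         return crystal(m-1, new_x, new_y)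
--     else:
--         return False
-- ===== SOURCE B (Python) =====
-- def crystal(m, x, y):
--     ACCEPT = {(1, 0), (2, 0), (3, 0), (2, 1)}
--     RECURSE = {(1, 1), (2, 2), (3, 1)}
--     # walk base-5 digit pairs from most significant (level m, unreduced quotient)
--     # down to level 1, each computed directly from the original x, y
--     p = (x // 5 ** (m - 1), y // 5 ** (m - 1))
--     for k in range(m - 1, 0, -1):
--         if p in ACCEPT:
--             return True
--         if p not in RECURSE:
--             return False
--         q = 5 ** (k - 1)
--         p = (x // q % 5, y // q % 5)
--     return p in ACCEPT
-- ===== Notes on version B (the rewrite author's own statement) =====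
-- stated objective: alternative
-- what changed: Replaces the tail recursion that rewrites x,y to x%5**(m-1),y%5**(m-1) at each level by a non-recursive loop that reads each level's base-5 digit pair directly from the original coordinates (top pair as the unreduced quotient, lower levels as x//5**(k-1)%5) and stops at the first non-recursing pair.
-- outside the precondition, e.g. on crystal(0, 3, 1): A returns False, B returns False
import Mathlib
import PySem

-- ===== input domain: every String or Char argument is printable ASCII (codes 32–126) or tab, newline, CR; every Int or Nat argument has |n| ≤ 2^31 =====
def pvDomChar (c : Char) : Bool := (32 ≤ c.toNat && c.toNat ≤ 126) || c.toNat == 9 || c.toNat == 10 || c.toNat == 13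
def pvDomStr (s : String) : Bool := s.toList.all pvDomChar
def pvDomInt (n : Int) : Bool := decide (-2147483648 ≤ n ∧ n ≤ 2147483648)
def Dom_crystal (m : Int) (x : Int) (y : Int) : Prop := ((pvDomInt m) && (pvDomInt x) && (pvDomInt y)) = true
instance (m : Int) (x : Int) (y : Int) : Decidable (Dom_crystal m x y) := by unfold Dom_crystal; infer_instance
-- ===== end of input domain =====

-- B replaces A's tail recursion (which rewrites x,y by % at each level) with an upfront
-- extraction of all base-5 digit pairs followed by a single scan (objective: alternative).

-- the two literal coordinate sets of the Python source
def pvAccept : List (Int × Int) := [(1, 0), (2, 0), (3, 0), (2, 1)]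
def pvRecurse : List (Int × Int) := [(1, 1), (2, 2), (3, 1)]

-- ===== PORT A =====
def crystal (m : Int) (x : Int) (y : Int) : Bool :=
  if m = 1 then
    if (x, y) ∈ pvAccept then true else false
  else if m < 1 then false  -- totality guard only; m < 1 is outside Pre_crystal
  else
    let p : Int := 5 ^ (m - 1).toNat
    let big_x := PySem.Int.floordiv x p
    let big_y := PySem.Int.floordiv y p
    if (big_x, big_y) ∈ pvAccept then true
    else if (big_x, big_y) ∈ pvRecurse then
      crystal (m - 1) (PySem.Int.mod x p) (PySem.Int.mod y p)
    else false
termination_by m.toNat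
decreasing_by omega

-- ===== PORT B =====
-- the loop: remaining levels k (descending), current digit pair p
def pvLoop (x : Int) (y : Int) : List Int → (Int × Int) → Bool
  | [], p => decide (p ∈ pvAccept)
  | k :: rest, p =>
    if p ∈ pvAccept then true
    else if p ∉ pvRecurse then false
    else pvLoop x y rest
      (PySem.Int.mod (PySem.Int.floordiv x (5 ^ (k - 1).toNat)) 5,
       PySem.Int.mod (PySem.Int.floordiv y (5 ^ (k - 1).toNat)) 5)

def crystal_alt (m : Int) (x : Int) (y : Int) : Bool :=
  pvLoop x y (PySem.List.pyRange (m - 1) 0 (-1))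
    (PySem.Int.floordiv x (5 ^ (m - 1).toNat), PySem.Int.floordiv y (5 ^ (m - 1).toNat))

-- ===== PRECONDITION & SPEC =====
-- Pre_ excludes m < 1: there Python evaluates 5**(m-1) as an IEEE float, so A's floor
-- divisions are float operations (deeper recursion can even hit ZeroDivisionError) and
-- are not representable in the Int port.
def Pre_crystal (m : Int) (x : Int) (y : Int) : Prop := 1 ≤ m
instance (m : Int) (x : Int) (y : Int) : Decidable (Pre_crystal m x y) := by unfold Pre_crystal; infer_instance
def pvWitness_crystal : Int × Int × Int := (3, 37, 2)

def Spec_crystal (m : Int) (x : Int) (y : Int) (out : Bool) : Prop := out = crystal_alt m x y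
instance (m : Int) (x : Int) (y : Int) (out : Bool) : Decidable (Spec_crystal m x y out) := by unfold Spec_crystal; infer_instance

-- ===== CLAIM (what is proved, stated in full; the proofs are below) =====
def Claim_equal_crystal : Prop := ∀ (m : Int) (x : Int) (y : Int), Dom_crystal m x y → Pre_crystal m x y → Spec_crystal m x y (crystal m x y)

-- ===== LEMMAS AND PROOFS =====

-- (x % (b*c)) / b = (x / b) % c for positive b, c
theorem pv_emod_mul_ediv (x b c : Int) (hb : 0 < b) (hc : 0 < c) :
    x % (b * c) / b = x / b % c := by
  have hR0 : 0 ≤ x % (b * c) := Int.emod_nonneg x (by positivity)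
  have hRlt : x % (b * c) < b * c := Int.emod_lt_of_pos x (by positivity)
  have hdef : x % (b * c) = x - b * (c * (x / (b * c))) := by
    have := Int.emod_def x (b * c); linarith [this]
  have hq : x % (b * c) / b = x / b - c * (x / (b * c)) := by
    have e1 : x % (b * c) = x + b * (-(c * (x / (b * c)))) := by rw [hdef]; ring
    rw [e1, Int.add_mul_ediv_left x _ (by omega : b ≠ 0)]; ring
  have hlt : x % (b * c) / b < c := by
    have := Int.ediv_lt_of_lt_mul hb (by linarith [hRlt] : x % (b * c) < c * b)
    exact this
  have hge : 0 ≤ x % (b * c) / b := Int.ediv_nonneg hR0 (le_of_lt hb)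
  have : x / b % c = (x % (b * c) / b + c * (x / (b * c))) % c := by rw [hq]; ring_nf
  rw [this, Int.add_mul_emod_self_left, Int.emod_eq_of_lt hge hlt]

theorem pv_digit_head (x : Int) (i : Nat) :
    x % (5 : Int) ^ (i + 1) / (5 : Int) ^ i = x / (5 : Int) ^ i % 5 := by
  have h5 : ((5 : Int) ^ (i + 1)) = 5 ^ i * 5 := pow_succ 5 i
  rw [h5, pv_emod_mul_ediv x _ 5 (by positivity) (by norm_num)]

theorem pv_digit_lower (x : Int) (i j : Nat) (h : i + 1 ≤ j) :
    x % (5 : Int) ^ j / (5 : Int) ^ i % 5 = x / (5 : Int) ^ i % 5 := by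
  have h5 : ((5 : Int) ^ j) = 5 ^ i * 5 ^ (j - i) := by rw [← pow_add]; congr 1; omega
  rw [h5, pv_emod_mul_ediv x _ _ (by positivity) (by positivity)]
  exact Int.emod_emod_of_dvd _ (dvd_pow_self 5 (by omega))

-- the digit pairs at the levels in l are the same for x,y and for x',y'
theorem pvLoop_congr (x y x' y' : Int) (l : List Int) (p : Int × Int)
    (hx : ∀ k ∈ l, PySem.Int.mod (PySem.Int.floordiv x (5 ^ (k - 1).toNat)) 5
                 = PySem.Int.mod (PySem.Int.floordiv x' (5 ^ (k - 1).toNat)) 5)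
    (hy : ∀ k ∈ l, PySem.Int.mod (PySem.Int.floordiv y (5 ^ (k - 1).toNat)) 5
                 = PySem.Int.mod (PySem.Int.floordiv y' (5 ^ (k - 1).toNat)) 5) :
    pvLoop x y l p = pvLoop x' y' l p := by
  induction l generalizing p with
  | nil => rfl
  | cons k rest ih =>
    rw [pvLoop, pvLoop, hx k (by simp), hy k (by simp)]
    split_ifs <;>
      first
        | rfl
        | exact ih _ (fun a ha => hx a (List.mem_cons_of_mem _ ha)) (fun a ha => hy a (List.mem_cons_of_mem _ ha))

theorem pv_main (n : Nat) : ∀ x y : Int, crystal ((n : Int) + 1) x y = crystal_alt ((n : Int) + 1) x y := by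
  have fd5 : ∀ (z : Int) (k : Nat), PySem.Int.floordiv z (5 ^ k) = z / 5 ^ k :=
    fun z k => PySem.Int.floordiv_eq_ediv_of_pos (by positivity)
  have md5 : ∀ (z : Int) (k : Nat), PySem.Int.mod z (5 ^ k) = z % 5 ^ k :=
    fun z k => PySem.Int.mod_eq_emod_of_pos (by positivity)
  have md1 : ∀ z : Int, PySem.Int.mod z 5 = z % 5 :=
    fun z => PySem.Int.mod_eq_emod_of_pos (by norm_num)
  induction n with
  | zero =>
    intro x y
    norm_num
    rw [crystal]
    unfold crystal_alt
    rw [PySem.List.pyRange_neg_one_eq_nil (by norm_num)]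
    norm_num [fd5, pvLoop]
  | succ n ih =>
    intro x y
    have hm2 : (2:Int) ≤ ((n+1 : Nat) : Int) + 1 := by push_cast; omega
    rw [crystal]
    rw [if_neg (by push_cast; omega : ¬ (((n+1 : Nat) : Int) + 1 = 1)),
        if_neg (by push_cast; omega : ¬ (((n+1 : Nat) : Int) + 1 < 1))]
    unfold crystal_alt
    rw [PySem.List.pyRange_neg_one_cons (by push_cast; omega : (0:Int) < ((n+1 : Nat) : Int) + 1 - 1),
        pvLoop]
    have e : ((n+1 : Nat) : Int) + 1 - 1 = ((n : Nat) : Int) + 1 := by push_cast; ring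
    simp only [e]
    split_ifs with h1 h2
    · rfl
    · -- recursing pair: the tail loop over the original x,y equals crystal_alt on the reduced x,y
      rw [ih]
      unfold crystal_alt
      have eN : (((n : Nat) : Int) + 1 - 1).toNat = n := by omega
      have eP : (((n : Nat) : Int) + 1).toNat = n + 1 := by omega
      simp only [eN, eP]
      have hx1 : PySem.Int.floordiv (PySem.Int.mod x (5 ^ (n+1))) (5 ^ n)
               = PySem.Int.mod (PySem.Int.floordiv x (5 ^ n)) 5 := by
        simp only [fd5, md5, md1]; exact pv_digit_head x n
      have hy1 : PySem.Int.floordiv (PySem.Int.mod y (5 ^ (n+1))) (5 ^ n)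
               = PySem.Int.mod (PySem.Int.floordiv y (5 ^ n)) 5 := by
        simp only [fd5, md5, md1]; exact pv_digit_head y n
      rw [hx1, hy1]
      apply pvLoop_congr
      · intro k hk
        obtain ⟨hk1, hk2⟩ := (PySem.List.mem_pyRange_neg_one).mp hk
        simp only [fd5, md5, md1]
        exact pv_digit_lower x (k-1).toNat (n+1) (by omega)
      · intro k hk
        obtain ⟨hk1, hk2⟩ := (PySem.List.mem_pyRange_neg_one).mp hk
        simp only [fd5, md5, md1]
        exact pv_digit_lower y (k-1).toNat (n+1) (by omega)
    · rfl

-- ===== VERDICT (by name: the statement is the Claim_ definition above) =====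
theorem crystal_spec : Claim_equal_crystal := by
  intro m x y _ hpre
  unfold Spec_crystal
  have hm : m = ((m - 1).toNat : Int) + 1 := by
    have : (0:Int) ≤ m - 1 := by exact sub_nonneg.mpr hpre
    omega
  rw [hm]; exact (pv_main (m - 1).toNat x y)
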